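-- pv_equiv track=rewrite | github.com/acresp/nmos-web-patcher | utils/sdp_filter.py | remove_secondary_streams
-- ===== SOURCE A (Python) =====
-- def remove_secondary_streams(sdp: str) -> str:
--     """
--     Delete secondary streams in SDP 'a=group:DUP'.
--     Keep only first MID of group DUP.
--     """
--     lines = sdp.splitlines()
--     new_lines = []
--     skip_mids = set()
--
--     for line in lines:
--         if line.startswith("a=group:DUP"):
--             mids = line.strip().split()[1:]
--             skip_mids.update(mids[1:])
--             continue
--
--     current_mid = None
--     buffer = []
--
--     for line in lines:
--         if line.startswith("m="):
--             if buffer: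
--                 if current_mid not in skip_mids:
--                     new_lines.extend(buffer)
--                 buffer = []
--                 current_mid = None
--         if line.startswith("a=mid:"):
--             current_mid = line.strip().split(":")[1]
--         buffer.append(line)
--
--     if buffer and current_mid not in skip_mids:
--         new_lines.extend(buffer)
--
--     return "\r\n".join(new_lines) + "\r\n"
-- ===== SOURCE B (Python) =====
-- def _block_mid(block):
--     mid = None
--     for line in block:
--         if line.startswith("a=mid:"):
--             mid = line.strip().split(":")[1]
--     return mid
--
--
-- def remove_secondary_streams(sdp: str) -> str:
--     """
--     Delete secondary streams in SDP 'a=group:DUP'.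
--     Keep only first MID of group DUP.
--     """
--     lines = sdp.splitlines()
--
--     skip_mids = set()
--     for line in lines:
--         if line.startswith("a=group:DUP"):
--             skip_mids.update(line.strip().split()[2:])
--
--     blocks = []
--     current = []
--     for line in lines:
--         if line.startswith("m="):
--             blocks.append(current)
--             current = [line]
--         else:
--             current.append(line)
--     blocks.append(current)
--
--     kept = [line for block in blocks
--             if _block_mid(block) not in skip_mids
--             for line in block]
--     return "\r\n".join(kept) + "\r\n"
-- ===== Notes on version B (the rewrite author's own statement) =====
-- stated objective: alternative
-- what changed: Replaces A's single stateful loop with interleaved flush/filter logic by a pipeline: segment the lines into m=-blocks, compute each block's mid with a separate helper, then filter blocks and flatten.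
import Mathlib
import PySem

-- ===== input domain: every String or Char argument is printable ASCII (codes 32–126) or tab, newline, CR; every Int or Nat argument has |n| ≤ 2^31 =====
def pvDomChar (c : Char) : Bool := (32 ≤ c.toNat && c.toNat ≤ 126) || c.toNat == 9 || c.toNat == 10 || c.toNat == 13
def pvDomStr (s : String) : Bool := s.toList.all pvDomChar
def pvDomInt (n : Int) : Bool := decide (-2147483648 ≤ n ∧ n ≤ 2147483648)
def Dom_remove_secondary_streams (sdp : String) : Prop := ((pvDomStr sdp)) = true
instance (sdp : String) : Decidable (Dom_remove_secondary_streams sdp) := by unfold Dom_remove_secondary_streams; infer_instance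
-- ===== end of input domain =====

-- B replaces A's single stateful flush-on-m= loop by a pipeline (segment into m=-blocks, compute each block's mid, filter, flatten); alternative decomposition, same cost.


-- shared helper: line.strip().split(":")[1] (both Pythons contain this exact expression;
-- the index is in range wherever it is evaluated: the line starts with "a=mid:", so the split has ≥ 2 parts)
def pvMidToken (line : String) : String :=
  ((PySem.Str.split? (PySem.Str.strip line) ":").getD []).getD 1 ""

-- shared helper: "current_mid not in skip_mids" (current_mid may be None, which is never in a set of strings)
def pvKeepMid (skip : PySem.Set String) (cur : Option String) : Bool :=
  match cur with
  | none => true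
  | some m => !(PySem.Set.contains skip m)

-- ===== PORT A =====
-- A's first loop: mids = line.strip().split()[1:]; skip_mids.update(mids[1:])
def pvSkipA (lines : List String) : PySem.Set String :=
  lines.foldl (fun s line =>
    if PySem.Str.startswith line "a=group:DUP" then
      let mids := (PySem.Str.split₀ (PySem.Str.strip line)).drop 1
      PySem.Set.update s (mids.drop 1)
    else s) PySem.Set.empty

-- A's second loop body; state = (new_lines, current_mid, buffer)
def pvAStep (skip : PySem.Set String)
    (st : List String × Option String × List String) (line : String) :
    List String × Option String × List String :=
  let nl := st.1
  let cur := st.2.1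
  let buf := st.2.2
  let s1 :=
    if PySem.Str.startswith line "m=" then
      if buf.isEmpty then (nl, cur, buf)
      else ((if pvKeepMid skip cur then nl ++ buf else nl), (none : Option String), ([] : List String))
    else (nl, cur, buf)
  let cur2 := if PySem.Str.startswith line "a=mid:" then some (pvMidToken line) else s1.2.1
  (s1.1, cur2, s1.2.2 ++ [line])

-- A's final flush: if buffer and current_mid not in skip_mids: new_lines.extend(buffer)
def pvAFinish (skip : PySem.Set String)
    (st : List String × Option String × List String) : List String :=
  if !st.2.2.isEmpty && pvKeepMid skip st.2.1 then st.1 ++ st.2.2 else st.1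

def remove_secondary_streams (sdp : String) : String :=
  let lines := PySem.Str.splitlines sdp
  let skip := pvSkipA lines
  let st := lines.foldl (pvAStep skip) ([], none, [])
  let new_lines := pvAFinish skip st
  PySem.Str.join "\r\n" new_lines ++ "\r\n"

-- ===== PORT B =====
-- B's skip pass: skip_mids.update(line.strip().split()[2:])
def pvSkipB (lines : List String) : PySem.Set String :=
  lines.foldl (fun s line =>
    if PySem.Str.startswith line "a=group:DUP" then
      PySem.Set.update s ((PySem.Str.split₀ (PySem.Str.strip line)).drop 2)
    else s) PySem.Set.empty

-- B's _block_mid helper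
def pvBlockMid (block : List String) : Option String :=
  block.foldl (fun mid line =>
    if PySem.Str.startswith line "a=mid:" then some (pvMidToken line) else mid) none

-- B's segmentation loop body; state = (blocks, current)
def pvSegStep (p : List (List String) × List String) (line : String) :
    List (List String) × List String :=
  if PySem.Str.startswith line "m=" then (p.1 ++ [p.2], [line])
  else (p.1, p.2 ++ [line])

def remove_secondary_streams_alt (sdp : String) : String :=
  let lines := PySem.Str.splitlines sdp
  let skip := pvSkipB lines
  let p := lines.foldl pvSegStep ([], [])
  let blocks := p.1 ++ [p.2]
  let kept := (blocks.filter (fun b => pvKeepMid skip (pvBlockMid b))).flatMap id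
  PySem.Str.join "\r\n" kept ++ "\r\n"

-- ===== PRECONDITION & SPEC =====
def Spec_remove_secondary_streams (sdp : String) (out : String) : Prop := out = remove_secondary_streams_alt sdp
instance (sdp : String) (out : String) : Decidable (Spec_remove_secondary_streams sdp out) := by unfold Spec_remove_secondary_streams; infer_instance

-- ===== CLAIM (what is proved, stated in full; the proofs are below) =====
def Claim_equal_remove_secondary_streams : Prop := ∀ (sdp : String), Dom_remove_secondary_streams sdp → Spec_remove_secondary_streams sdp (remove_secondary_streams sdp)

-- ===== LEMMAS AND PROOFS =====

-- the two skip passes compute the same set ([1:][1:] = [2:])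
theorem pvSkip_eq (lines : List String) : pvSkipA lines = pvSkipB lines := by
  have hf : (fun (s : PySem.Set String) (line : String) =>
        if PySem.Str.startswith line "a=group:DUP" then
          let mids := (PySem.Str.split₀ (PySem.Str.strip line)).drop 1
          PySem.Set.update s (mids.drop 1)
        else s)
      = (fun (s : PySem.Set String) (line : String) =>
        if PySem.Str.startswith line "a=group:DUP" then
          PySem.Set.update s ((PySem.Str.split₀ (PySem.Str.strip line)).drop 2)
        else s) := by
    funext s line
    by_cases h : PySem.Str.startswith line "a=group:DUP" = true
    · simp only [h, if_true, List.drop_drop]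
    · simp only [Bool.not_eq_true] at h
      simp only [h, Bool.false_eq_true, if_false]
  unfold pvSkipA pvSkipB
  rw [hf]

-- a line starting with "m=" does not start with "a=mid:"
theorem pv_m_not_mid {l : String} (h : PySem.Chars.startswith l.toList ['m', '='] = true) :
    PySem.Chars.startswith l.toList ['a', '=', 'm', 'i', 'd', ':'] = false := by
  by_contra hc
  rw [Bool.not_eq_false] at hc
  rw [PySem.Chars.startswith_iff] at h hc
  obtain ⟨t1, h1⟩ := h
  obtain ⟨t2, h2⟩ := hc
  have e1 : l.toList[0]? = some 'm' := by rw [← h1]; rfl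
  have e2 : l.toList[0]? = some 'a' := by rw [← h2]; rfl
  rw [e1] at e2
  exact absurd e2 (by decide)

-- mathematical form of B's segmentation
def pvSeg (cur : List String) : List String → List (List String)
  | [] => [cur]
  | l :: ls =>
      if PySem.Str.startswith l "m=" then cur :: pvSeg [l] ls
      else pvSeg (cur ++ [l]) ls

-- B's foldl segmentation equals pvSeg
theorem pvSeg_run (lines : List String) :
    ∀ (done : List (List String)) (cur : List String),
    (lines.foldl pvSegStep (done, cur)).1 ++ [(lines.foldl pvSegStep (done, cur)).2]
      = done ++ pvSeg cur lines := by
  induction lines with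
  | nil => intro done cur; simp [pvSeg]
  | cons l ls ih =>
    intro done cur
    by_cases h : PySem.Chars.startswith l.toList ['m', '='] = true
    · simp [pvSegStep, pvSeg, h, ih]
    · simp only [Bool.not_eq_true] at h
      simp [pvSegStep, pvSeg, h, ih]

-- block mid extends by one line
theorem pvBlockMid_snoc (buf : List String) (l : String) :
    pvBlockMid (buf ++ [l])
      = if PySem.Str.startswith l "a=mid:" then some (pvMidToken l) else pvBlockMid buf := by
  unfold pvBlockMid
  rw [List.foldl_append]
  rfl

-- the empty block has no mid and is always kept
theorem pvKeep_nil (skip : PySem.Set String) : pvKeepMid skip (pvBlockMid []) = true := rfl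

-- a lone "m=" line has no mid
theorem pvBlockMid_m {l : String} (h : PySem.Chars.startswith l.toList ['m', '='] = true) :
    pvBlockMid [l] = none := by
  simp [pvBlockMid, pv_m_not_mid h]

-- A's step on an "m=" line with a non-empty buffer: flush, reset, start buffer [l]
theorem pvAStep_m_flush (skip : PySem.Set String) (nl : List String) (cur : Option String)
    (x : String) (xs : List String) {l : String}
    (hm : PySem.Chars.startswith l.toList ['m', '='] = true) :
    pvAStep skip (nl, cur, x :: xs) l
      = ((if pvKeepMid skip cur then nl ++ (x :: xs) else nl), none, [l]) := by
  simp [pvAStep, hm, pv_m_not_mid hm]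

-- A's step on an "m=" line with an empty buffer: no flush
theorem pvAStep_m_empty (skip : PySem.Set String) (nl : List String) (cur : Option String)
    {l : String} (hm : PySem.Chars.startswith l.toList ['m', '='] = true) :
    pvAStep skip (nl, cur, []) l = (nl, cur, [l]) := by
  simp [pvAStep, hm, pv_m_not_mid hm]

-- A's step on any other line: track the mid, append to the buffer
theorem pvAStep_other (skip : PySem.Set String) (nl : List String) (buf : List String)
    {l : String} (hm : PySem.Chars.startswith l.toList ['m', '='] = false) :
    pvAStep skip (nl, pvBlockMid buf, buf) l = (nl, pvBlockMid (buf ++ [l]), buf ++ [l]) := by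
  simp [pvAStep, hm, pvBlockMid_snoc]

-- main invariant: running A's loop from (nl, blockMid buf, buf) and flushing at the end
-- equals nl ++ the flattened kept blocks of B's segmentation starting at buf
theorem pvMain (skip : PySem.Set String) (lines : List String) :
    ∀ (nl buf : List String),
    pvAFinish skip (lines.foldl (pvAStep skip) (nl, pvBlockMid buf, buf)) =
      nl ++ ((pvSeg buf lines).filter (fun b => pvKeepMid skip (pvBlockMid b))).flatMap id := by
  induction lines with
  | nil =>
    intro nl buf
    simp only [List.foldl_nil, pvSeg, pvAFinish]
    cases buf with
    | nil => simp [pvKeep_nil]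
    | cons x xs =>
      by_cases hk : pvKeepMid skip (pvBlockMid (x :: xs)) = true
      · simp [hk]
      · simp only [Bool.not_eq_true] at hk
        simp [hk]
  | cons l ls ih =>
    intro nl buf
    rw [List.foldl_cons]
    by_cases hm : PySem.Chars.startswith l.toList ['m', '='] = true
    · cases buf with
      | nil =>
        rw [pvAStep_m_empty skip nl _ hm,
            show pvBlockMid ([] : List String) = pvBlockMid [l] from (pvBlockMid_m hm).symm,
            ih nl [l]]
        simp [pvSeg, hm, pvKeep_nil]
      | cons x xs =>
        rw [pvAStep_m_flush skip nl _ x xs hm,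
            show (none : Option String) = pvBlockMid [l] from (pvBlockMid_m hm).symm,
            ih _ [l]]
        by_cases hk : pvKeepMid skip (pvBlockMid (x :: xs)) = true
        · simp [pvSeg, hm, hk]
        · simp only [Bool.not_eq_true] at hk
          simp [pvSeg, hm, hk]
    · simp only [Bool.not_eq_true] at hm
      rw [pvAStep_other skip nl buf hm, ih nl (buf ++ [l])]
      simp [pvSeg, hm]

-- ===== VERDICT (by name: the statement is the Claim_ definition above) =====
theorem remove_secondary_streams_spec : Claim_equal_remove_secondary_streams := by
  intro sdp _
  show PySem.Str.join "\r\n"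
        (pvAFinish (pvSkipA (PySem.Str.splitlines sdp))
          ((PySem.Str.splitlines sdp).foldl (pvAStep (pvSkipA (PySem.Str.splitlines sdp)))
            ([], none, []))) ++ "\r\n"
      = PySem.Str.join "\r\n"
          (((((PySem.Str.splitlines sdp).foldl pvSegStep ([], [])).1 ++
              [((PySem.Str.splitlines sdp).foldl pvSegStep ([], [])).2]).filter
            (fun b => pvKeepMid (pvSkipB (PySem.Str.splitlines sdp)) (pvBlockMid b))).flatMap id) ++ "\r\n"
  rw [pvSkip_eq,
      show (([], none, []) : List String × Option String × List String)
        = ([], pvBlockMid [], []) from rfl,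
      pvMain, pvSeg_run]
  simp
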